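-- pv_equiv track=rewrite | github.com/greedyTaiga/tic-tac-toe | sequence.py | check_sub_in_diag
-- ===== SOURCE A (Python) =====
-- def check_sub_in_diag(matrix, s):
--     for i in range(len(matrix) - len(s) + 1):
--         for j in range(len(matrix[i]) - len(s) + 1):
--             seq = []
--             for k in range(len(s)):
--                 seq.append(matrix[i + k][j + k])
--             if seq == s:
--                 return True
--     return False
-- ===== SOURCE B (Python) =====
-- def check_sub_in_diag(matrix, s):
--     m, L = len(matrix), len(s)
--     heads = [(i, j) for i in range(m) for j in range(len(matrix[i]))
--              if i == 0 or j == 0 or j - 1 >= len(matrix[i - 1])]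
--     for i, j in heads:
--         diag = []
--         while i < m and j < len(matrix[i]):
--             diag.append(matrix[i][j])
--             i += 1
--             j += 1
--         for k in range(len(diag) - L + 1):
--             if diag[k:k + L] == s:
--                 return True
--     return False
-- ===== Notes on version B (the rewrite author's own statement) =====
-- stated objective: alternative
-- what changed: B serializes each diagonal run once (walking from cells with no up-left neighbour) and slides the pattern over that 1-D list with slice comparisons, instead of A's re-materializing a fresh window list element-by-element at every (i, j) start cell.
-- outside the precondition, e.g. on check_sub_in_diag([[1], [9, 1]], [1, 1]): A returns False, B returns True; on check_sub_in_diag([[1, 1], [1, 1], [5]], [1, 1]): A returns True, B returns True; on check_sub_in_diag([[], []], []): A returns True, B returns False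
import Mathlib
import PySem

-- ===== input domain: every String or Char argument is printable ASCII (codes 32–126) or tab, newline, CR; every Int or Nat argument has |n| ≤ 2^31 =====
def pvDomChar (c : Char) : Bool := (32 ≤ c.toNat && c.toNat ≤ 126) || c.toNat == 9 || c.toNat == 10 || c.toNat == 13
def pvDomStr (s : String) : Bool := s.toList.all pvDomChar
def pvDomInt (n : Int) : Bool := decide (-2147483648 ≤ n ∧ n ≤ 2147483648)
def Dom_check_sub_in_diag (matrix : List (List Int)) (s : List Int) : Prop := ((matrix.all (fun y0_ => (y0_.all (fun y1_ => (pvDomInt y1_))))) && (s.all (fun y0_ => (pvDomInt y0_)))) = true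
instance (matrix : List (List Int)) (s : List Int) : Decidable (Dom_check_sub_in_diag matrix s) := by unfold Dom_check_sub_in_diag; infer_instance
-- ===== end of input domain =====

-- B serializes each diagonal run once (starting at cells with no up-left neighbour) and slides the
-- pattern over that 1-D list with slice comparisons, instead of A's re-materializing a fresh window
-- list element-by-element at every (i, j) start cell (an alternative algorithm of the same cost).


-- ===== PORT A =====
def check_sub_in_diag (matrix : List (List Int)) (s : List Int) : Bool :=
  (PySem.List.pyRange 0 ((matrix.length : Int) - (s.length : Int) + 1) 1).any (fun i =>
    (PySem.List.pyRange 0 (((PySem.List.pyGetD matrix i ([] : List Int)).length : Int) - (s.length : Int) + 1) 1).any (fun j =>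
      ((PySem.List.pyRange 0 (s.length : Int) 1).foldl
        (fun seq k => seq ++ [PySem.List.pyGetD (PySem.List.pyGetD matrix (i + k) ([] : List Int)) (j + k) 0]) []) == s))

-- ===== PORT B =====
-- the 'while i < m and j < len(matrix[i]): diag.append(matrix[i][j]); i += 1; j += 1' loop of Source B
def pvWalkDiag (matrix : List (List Int)) (m : Int) (i j : Int) : List Int :=
  if h : i < m ∧ j < ((PySem.List.pyGetD matrix i ([] : List Int)).length : Int) then
    PySem.List.pyGetD (PySem.List.pyGetD matrix i ([] : List Int)) j 0 :: pvWalkDiag matrix m (i + 1) (j + 1)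
  else []
termination_by (m - i).toNat
decreasing_by omega

def check_sub_in_diag_alt (matrix : List (List Int)) (s : List Int) : Bool :=
  let m : Int := matrix.length
  let L : Int := s.length
  let heads : List (Int × Int) :=
    (PySem.List.pyRange 0 m 1).flatMap (fun i =>
      ((PySem.List.pyRange 0 (((PySem.List.pyGetD matrix i ([] : List Int)).length : Int)) 1).filter
        (fun j => i == 0 || j == 0 || decide (((PySem.List.pyGetD matrix (i - 1) ([] : List Int)).length : Int) ≤ j - 1))).map
        (fun j => (i, j)))
  heads.any (fun p =>
    let diag := pvWalkDiag matrix m p.1 p.2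
    (PySem.List.pyRange 0 ((diag.length : Int) - L + 1) 1).any (fun k =>
      PySem.List.slice diag (some k) (some (k + L)) == s))

-- ===== PRECONDITION & SPEC =====
-- Pre_ excludes (a) s = [] on matrices without any cell, where A raises IndexError (matrix[0] on [])
-- or returns a True that is an accident of scanning the row index 0 before testing it, and (b) ragged
-- matrices on which the set of windows A's per-row bound len(matrix[i]) scans differs from the actual
-- diagonal runs of the grid — there A may raise IndexError off a short row, and which windows it
-- scans is an accident of its scan order; on rectangular matrices (the tic-tac-toe boards this
-- function is for) Pre_ always holds.
def Pre_check_sub_in_diag (matrix : List (List Int)) (s : List Int) : Prop :=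
  (s = [] → ∃ row ∈ matrix, row ≠ []) ∧
  (s ≠ [] →
    (∀ i < matrix.length, ∀ j < (matrix.getD i []).length,
        i + s.length ≤ matrix.length → j + s.length ≤ (matrix.getD i []).length →
        ∀ k < s.length, j + k < (matrix.getD (i + k) []).length) ∧
    (∀ i < matrix.length, ∀ j < (matrix.getD i []).length,
        (∀ k < s.length, i + k < matrix.length ∧ j + k < (matrix.getD (i + k) []).length) →
        i + s.length ≤ matrix.length ∧ j + s.length ≤ (matrix.getD i []).length))
instance (matrix : List (List Int)) (s : List Int) : Decidable (Pre_check_sub_in_diag matrix s) := by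
  unfold Pre_check_sub_in_diag
  have d1 : Decidable (s = [] → ∃ row ∈ matrix, row ≠ []) := inferInstance
  have d2 : Decidable (∀ i < matrix.length, ∀ j < (matrix.getD i []).length,
      i + s.length ≤ matrix.length → j + s.length ≤ (matrix.getD i []).length →
      ∀ k < s.length, j + k < (matrix.getD (i + k) []).length) := inferInstance
  have d3 : Decidable (∀ i < matrix.length, ∀ j < (matrix.getD i []).length,
      (∀ k < s.length, i + k < matrix.length ∧ j + k < (matrix.getD (i + k) []).length) →
      i + s.length ≤ matrix.length ∧ j + s.length ≤ (matrix.getD i []).length) := inferInstance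
  have d4 : Decidable (s ≠ []) := inferInstance
  exact @instDecidableAnd _ _ d1 (@forall_prop_decidable _ _ d4 (fun _ => @instDecidableAnd _ _ d2 d3))

def pvWitness_check_sub_in_diag : List (List Int) × List Int := ([[1, 2, 3], [4, 1, 6], [7, 8, 1]], [1, 1, 1])

def Spec_check_sub_in_diag (matrix : List (List Int)) (s : List Int) (out : Bool) : Prop := out = check_sub_in_diag_alt matrix s
instance (matrix : List (List Int)) (s : List Int) (out : Bool) : Decidable (Spec_check_sub_in_diag matrix s out) := by unfold Spec_check_sub_in_diag; infer_instance

-- ===== CLAIM (what is proved, stated in full; the proofs are below) =====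
def Claim_equal_check_sub_in_diag : Prop := ∀ (matrix : List (List Int)) (s : List Int), Dom_check_sub_in_diag matrix s → Pre_check_sub_in_diag matrix s → Spec_check_sub_in_diag matrix s (check_sub_in_diag matrix s)

-- ===== LEMMAS AND PROOFS =====

-- the window of L diagonal cells starting at (i, j) (proof-side abstraction of both programs)
def pvWin (matrix : List (List Int)) (L i j : Nat) : List Int :=
  (List.range L).map (fun t => (matrix.getD (i + t) []).getD (j + t) 0)

-- cell (i, j) exists in the (possibly ragged) grid
def pvCell (matrix : List (List Int)) (i j : Nat) : Prop :=
  i < matrix.length ∧ j < (matrix.getD i []).length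

-- length of the diagonal run starting at (i, j) (proof-side mirror of pvWalkDiag)
def pvRunLen (matrix : List (List Int)) (i j : Nat) : Nat :=
  if i < matrix.length ∧ j < (matrix.getD i []).length then pvRunLen matrix (i + 1) (j + 1) + 1
  else 0
termination_by matrix.length - i
decreasing_by omega

-- Source B's head condition: the cell exists and has no up-left diagonal neighbour
def pvHead (matrix : List (List Int)) (i j : Nat) : Prop :=
  pvCell matrix i j ∧ (i = 0 ∨ j = 0 ∨ (matrix.getD (i - 1) []).length + 1 ≤ j)

theorem any_pyRange_iff (b : Int) (p : Int → Bool) :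
    (PySem.List.pyRange 0 b 1).any p = true ↔ ∃ k : Nat, (k : Int) < b ∧ p k = true := by
  rw [List.any_eq_true]
  constructor
  · rintro ⟨x, hx, hp⟩
    rw [PySem.List.mem_pyRange_one] at hx
    refine ⟨x.toNat, by omega, ?_⟩
    rwa [Int.toNat_of_nonneg hx.1]
  · rintro ⟨k, hk, hp⟩
    exact ⟨k, by rw [PySem.List.mem_pyRange_one]; omega, hp⟩

theorem seq_eq (matrix : List (List Int)) (L : Nat) (i j : Nat) :
    ((PySem.List.pyRange 0 (L : Int) 1).foldl
      (fun seq k => seq ++ [PySem.List.pyGetD (PySem.List.pyGetD matrix ((i : Int) + k) ([] : List Int)) ((j : Int) + k) 0]) []) =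
      pvWin matrix L i j := by
  rw [PySem.List.foldl_append_singleton_eq_map, PySem.List.pyRange_zero_natCast, List.map_map]
  unfold pvWin
  apply List.map_congr_left
  intro t _
  have h1 : (i : Int) + (t : Int) = ((i + t : Nat) : Int) := by push_cast; ring
  have h2 : (j : Int) + (t : Int) = ((j + t : Nat) : Int) := by push_cast; ring
  simp only [Function.comp_apply, h1, h2, PySem.List.pyGetD_natCast]

theorem A_iff (matrix : List (List Int)) (s : List Int) (hs : s ≠ []) :
    check_sub_in_diag matrix s = true ↔
      ∃ i j : Nat, i + s.length ≤ matrix.length ∧ j + s.length ≤ (matrix.getD i []).length ∧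
        pvWin matrix s.length i j = s := by
  have hL : 1 ≤ s.length := List.length_pos_iff.mpr hs
  unfold check_sub_in_diag
  rw [any_pyRange_iff]
  constructor
  · rintro ⟨i, hi, hp⟩
    rw [any_pyRange_iff] at hp
    obtain ⟨j, hj, hq⟩ := hp
    rw [PySem.List.pyGetD_natCast] at hj
    rw [seq_eq, beq_iff_eq] at hq
    exact ⟨i, j, by omega, by omega, hq⟩
  · rintro ⟨i, j, hi, hj, hw⟩
    refine ⟨i, by omega, ?_⟩
    rw [any_pyRange_iff]
    refine ⟨j, by rw [PySem.List.pyGetD_natCast]; omega, ?_⟩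
    rw [seq_eq, beq_iff_eq]; exact hw

theorem walk_eq (matrix : List (List Int)) (i j : Nat) :
    pvWalkDiag matrix (matrix.length : Int) (i : Int) (j : Int) =
      (List.range (pvRunLen matrix i j)).map
        (fun t => (matrix.getD (i + t) []).getD (j + t) 0) := by
  have key : ∀ d i j : Nat, matrix.length - i ≤ d →
      pvWalkDiag matrix (matrix.length : Int) (i : Int) (j : Int) =
        (List.range (pvRunLen matrix i j)).map
          (fun t => (matrix.getD (i + t) []).getD (j + t) 0) := by
    intro d
    induction d with
    | zero =>
      intro i j hd
      rw [pvWalkDiag, pvRunLen]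
      have h : ¬(i < matrix.length ∧ j < (matrix.getD i []).length) := by omega
      have hc : ¬((i : Int) < (matrix.length : Int) ∧
          (j : Int) < ((PySem.List.pyGetD matrix (i : Int) ([] : List Int)).length : Int)) := by
        rw [PySem.List.pyGetD_natCast]; omega
      rw [dif_neg hc, if_neg h]
      simp
    | succ d ih =>
      intro i j hd
      rw [pvWalkDiag, pvRunLen]
      by_cases h : i < matrix.length ∧ j < (matrix.getD i []).length
      · have hc : ((i : Int) < (matrix.length : Int) ∧
            (j : Int) < ((PySem.List.pyGetD matrix (i : Int) ([] : List Int)).length : Int)) := by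
          rw [PySem.List.pyGetD_natCast]; omega
        rw [dif_pos hc, if_pos h]
        have e1 : (i : Int) + 1 = ((i + 1 : Nat) : Int) := by push_cast; ring
        have e2 : (j : Int) + 1 = ((j + 1 : Nat) : Int) := by push_cast; ring
        rw [e1, e2, ih (i + 1) (j + 1) (by omega)]
        rw [List.range_succ_eq_map, List.map_cons, List.map_map]
        congr 1
        · simp [PySem.List.pyGetD_natCast]
        · apply List.map_congr_left
          intro t _
          simp only [Function.comp_apply, Nat.succ_eq_add_one]
          rw [show i + 1 + t = i + (t + 1) from by omega, show j + 1 + t = j + (t + 1) from by omega]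
      · have hc : ¬((i : Int) < (matrix.length : Int) ∧
            (j : Int) < ((PySem.List.pyGetD matrix (i : Int) ([] : List Int)).length : Int)) := by
          rw [PySem.List.pyGetD_natCast]; omega
        rw [dif_neg hc, if_neg h]
        simp
  exact key matrix.length i j (by omega)

theorem runLen_ge_iff (matrix : List (List Int)) (L : Nat) : ∀ i j : Nat,
    (L ≤ pvRunLen matrix i j ↔ ∀ k < L, pvCell matrix (i + k) (j + k)) := by
  induction L with
  | zero => intro i j; simp
  | succ L ih =>
    intro i j
    rw [pvRunLen]
    by_cases h : i < matrix.length ∧ j < (matrix.getD i []).length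
    · rw [if_pos h]
      constructor
      · intro hle k hk
        rcases Nat.eq_zero_or_pos k with rfl | hk0
        · simpa [pvCell] using h
        · have := (ih (i + 1) (j + 1)).mp (by omega) (k - 1) (by omega)
          unfold pvCell at this ⊢
          rw [show i + k = i + 1 + (k - 1) from by omega, show j + k = j + 1 + (k - 1) from by omega]
          exact this
      · intro hall
        have : ∀ k < L, pvCell matrix (i + 1 + k) (j + 1 + k) := by
          intro k hk
          have := hall (k + 1) (by omega)
          rw [show i + 1 + k = i + (k + 1) from by omega, show j + 1 + k = j + (k + 1) from by omega]
          exact this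
        have := (ih (i + 1) (j + 1)).mpr this
        omega
    · rw [if_neg h]
      constructor
      · intro hle; omega
      · intro hall
        have := hall 0 (by omega)
        unfold pvCell at this
        simp only [Nat.add_zero] at this
        exact absurd this h

theorem back_to_head (matrix : List (List Int)) : ∀ i j : Nat, pvCell matrix i j →
    ∃ i0 j0 k : Nat, i0 + k = i ∧ j0 + k = j ∧ pvHead matrix i0 j0 ∧
      k + pvRunLen matrix i j ≤ pvRunLen matrix i0 j0 := by
  intro i
  induction i with
  | zero =>
    intro j hc
    exact ⟨0, j, 0, by omega, by omega, ⟨hc, Or.inl rfl⟩, by omega⟩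
  | succ i ih =>
    intro j hc
    by_cases hj : j = 0
    · exact ⟨i + 1, j, 0, by omega, by omega, ⟨hc, Or.inr (Or.inl hj)⟩, by omega⟩
    · by_cases hp : pvCell matrix i (j - 1)
      · obtain ⟨i0, j0, k, hi0, hj0, hh, hr⟩ := ih (j - 1) hp
        refine ⟨i0, j0, k + 1, by omega, by omega, hh, ?_⟩
        have hrun : pvRunLen matrix i (j - 1) = pvRunLen matrix (i + 1) (j - 1 + 1) + 1 := by
          rw [pvRunLen]; unfold pvCell at hp; rw [if_pos hp]
        rw [show j - 1 + 1 = j from by omega] at hrun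
        omega
      · refine ⟨i + 1, j, 0, by omega, by omega, ⟨hc, Or.inr (Or.inr ?_)⟩, by omega⟩
        have him : i < matrix.length := by unfold pvCell at hc; omega
        have h2 : ¬(j - 1 < (matrix.getD i []).length) := fun hb => hp ⟨him, hb⟩
        simp only [Nat.add_sub_cancel]
        omega

theorem heads_mem (matrix : List (List Int)) (p : Int × Int) :
    (p ∈ (PySem.List.pyRange 0 (matrix.length : Int) 1).flatMap (fun i =>
      ((PySem.List.pyRange 0 (((PySem.List.pyGetD matrix i ([] : List Int)).length : Int)) 1).filter
        (fun j => i == 0 || j == 0 || decide (((PySem.List.pyGetD matrix (i - 1) ([] : List Int)).length : Int) ≤ j - 1))).map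
        (fun j => (i, j)))) ↔
    ∃ i0 j0 : Nat, p = ((i0 : Int), (j0 : Int)) ∧ pvHead matrix i0 j0 := by
  rw [List.mem_flatMap]
  constructor
  · rintro ⟨i, hi, hp⟩
    rw [PySem.List.mem_pyRange_one] at hi
    obtain ⟨ni, rfl⟩ : ∃ ni : Nat, i = (ni : Int) := ⟨i.toNat, by omega⟩
    obtain ⟨j, hj, rfl⟩ := List.mem_map.mp hp
    rw [List.mem_filter, PySem.List.mem_pyRange_one] at hj
    obtain ⟨⟨hj0, hjlen⟩, hcond⟩ := hj
    obtain ⟨nj, rfl⟩ : ∃ nj : Nat, j = (nj : Int) := ⟨j.toNat, by omega⟩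
    rw [PySem.List.pyGetD_natCast] at hjlen
    refine ⟨ni, nj, rfl, ⟨⟨by omega, by omega⟩, ?_⟩⟩
    by_cases hni : ni = 0
    · exact Or.inl hni
    by_cases hnj : nj = 0
    · exact Or.inr (Or.inl hnj)
    refine Or.inr (Or.inr ?_)
    simp only [Bool.or_eq_true, beq_iff_eq, decide_eq_true_eq] at hcond
    rcases hcond with (h | h) | h
    · omega
    · omega
    · rw [show ((ni : Int) - 1) = ((ni - 1 : Nat) : Int) from by omega,
          PySem.List.pyGetD_natCast] at h
      omega
  · rintro ⟨i0, j0, rfl, ⟨⟨him, hjm⟩, hcond⟩⟩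
    refine ⟨(i0 : Int), by rw [PySem.List.mem_pyRange_one]; omega, ?_⟩
    refine List.mem_map.mpr ⟨(j0 : Int), ?_, rfl⟩
    rw [List.mem_filter, PySem.List.mem_pyRange_one, PySem.List.pyGetD_natCast]
    refine ⟨by omega, ?_⟩
    simp only [Bool.or_eq_true, beq_iff_eq, decide_eq_true_eq]
    by_cases hi0 : i0 = 0
    · exact Or.inl (Or.inl (by omega))
    rcases hcond with h | h | h
    · exact Or.inl (Or.inl (by omega))
    · exact Or.inl (Or.inr (by omega))
    · refine Or.inr ?_
      rw [show ((i0 : Int) - 1) = ((i0 - 1 : Nat) : Int) from by omega, PySem.List.pyGetD_natCast]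
      omega

theorem drop_take_map_range {α : Type} (f : Nat → α) (M k L : Nat) (h : k + L ≤ M) :
    (((List.range M).map f).drop k).take L = (List.range L).map (fun t => f (k + t)) := by
  apply List.ext_getElem
  · simp; omega
  · intro t h1 h2
    simp only [List.getElem_take, List.getElem_drop, List.getElem_map, List.getElem_range]

theorem slice_window (matrix : List (List Int)) (L : Nat) (i0 j0 k : Nat)
    (hk : k + L ≤ pvRunLen matrix i0 j0) :
    PySem.List.slice (pvWalkDiag matrix (matrix.length : Int) (i0 : Int) (j0 : Int))
        (some (k : Int)) (some ((k : Int) + (L : Int))) =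
      pvWin matrix L (i0 + k) (j0 + k) := by
  rw [walk_eq, PySem.List.slice_natCast_add, drop_take_map_range _ _ _ _ hk]
  unfold pvWin
  apply List.map_congr_left
  intro t _
  rw [show i0 + (k + t) = i0 + k + t from by omega, show j0 + (k + t) = j0 + k + t from by omega]

theorem B_iff (matrix : List (List Int)) (s : List Int) :
    check_sub_in_diag_alt matrix s = true ↔
      ∃ i0 j0 : Nat, pvHead matrix i0 j0 ∧
        ∃ k : Nat, k + s.length ≤ pvRunLen matrix i0 j0 ∧
          pvWin matrix s.length (i0 + k) (j0 + k) = s := by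
  unfold check_sub_in_diag_alt
  rw [List.any_eq_true]
  constructor
  · rintro ⟨p, hp, hq⟩
    obtain ⟨i0, j0, rfl, hhead⟩ := (heads_mem matrix p).mp hp
    simp only at hq
    rw [any_pyRange_iff] at hq
    obtain ⟨k, hk, hsl⟩ := hq
    have hlen : (pvWalkDiag matrix (matrix.length : Int) (i0 : Int) (j0 : Int)).length
        = pvRunLen matrix i0 j0 := by
      rw [walk_eq]; simp
    rw [hlen] at hk
    have hkL : k + s.length ≤ pvRunLen matrix i0 j0 := by omega
    rw [slice_window matrix _ _ _ _ hkL, beq_iff_eq] at hsl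
    exact ⟨i0, j0, hhead, k, hkL, hsl⟩
  · rintro ⟨i0, j0, hhead, k, hk, hw⟩
    refine ⟨((i0 : Int), (j0 : Int)), (heads_mem matrix _).mpr ⟨i0, j0, rfl, hhead⟩, ?_⟩
    simp only
    rw [any_pyRange_iff]
    refine ⟨k, ?_, ?_⟩
    · rw [walk_eq]
      simp only [List.length_map, List.length_range]
      omega
    · rw [slice_window matrix _ _ _ _ hk, beq_iff_eq]; exact hw

theorem exists_equiv (matrix : List (List Int)) (s : List Int) (hL : 1 ≤ s.length)
    (hC1 : ∀ i < matrix.length, ∀ j < (matrix.getD i []).length,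
        i + s.length ≤ matrix.length → j + s.length ≤ (matrix.getD i []).length →
        ∀ k < s.length, j + k < (matrix.getD (i + k) []).length)
    (hC2 : ∀ i < matrix.length, ∀ j < (matrix.getD i []).length,
        (∀ k < s.length, i + k < matrix.length ∧ j + k < (matrix.getD (i + k) []).length) →
        i + s.length ≤ matrix.length ∧ j + s.length ≤ (matrix.getD i []).length) :
    (∃ i j : Nat, i + s.length ≤ matrix.length ∧ j + s.length ≤ (matrix.getD i []).length ∧
        pvWin matrix s.length i j = s) ↔
    (∃ i0 j0 : Nat, pvHead matrix i0 j0 ∧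
        ∃ k : Nat, k + s.length ≤ pvRunLen matrix i0 j0 ∧
          pvWin matrix s.length (i0 + k) (j0 + k) = s) := by
  constructor
  · rintro ⟨i, j, hi, hj, hP⟩
    have hcells : ∀ k < s.length, pvCell matrix (i + k) (j + k) := by
      intro k hk
      exact ⟨by omega, hC1 i (by omega) j (by omega) hi hj k hk⟩
    have hrun : s.length ≤ pvRunLen matrix i j := (runLen_ge_iff matrix s.length i j).mpr hcells
    obtain ⟨i0, j0, k, hi0, hj0, hhead, hr⟩ :=
      back_to_head matrix i j (by simpa using hcells 0 (by omega))
    refine ⟨i0, j0, hhead, k, by omega, ?_⟩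
    rw [hi0, hj0]; exact hP
  · rintro ⟨i0, j0, hhead, k, hk, hP⟩
    have hcells : ∀ t < s.length, pvCell matrix (i0 + k + t) (j0 + k + t) := by
      intro t ht
      have := (runLen_ge_iff matrix (k + s.length) i0 j0).mp hk (k + t) (by omega)
      rw [show i0 + (k + t) = i0 + k + t from by omega, show j0 + (k + t) = j0 + k + t from by omega] at this
      exact this
    have hcell0 := hcells 0 (by omega)
    simp only [Nat.add_zero] at hcell0
    obtain ⟨hbi, hbj⟩ := hC2 (i0 + k) hcell0.1 (j0 + k) hcell0.2 (fun t ht => hcells t ht)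
    exact ⟨i0 + k, j0 + k, hbi, hbj, hP⟩

theorem A_empty_s (matrix : List (List Int)) :
    check_sub_in_diag matrix [] = true := by
  unfold check_sub_in_diag
  rw [any_pyRange_iff]
  refine ⟨0, by simp only [List.length_nil]; push_cast; omega, ?_⟩
  rw [any_pyRange_iff]
  refine ⟨0, by simp only [List.length_nil]; push_cast; omega, ?_⟩
  simp

theorem B_empty_s (matrix : List (List Int)) (hm : ∃ row ∈ matrix, row ≠ []) :
    check_sub_in_diag_alt matrix [] = true := by
  obtain ⟨row, hrow, hne⟩ := hm
  obtain ⟨r, hr, hrget⟩ := List.getElem_of_mem hrow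
  have hcell : pvCell matrix r 0 := by
    refine ⟨hr, ?_⟩
    rw [List.getD_eq_getElem _ _ hr, hrget]
    exact List.length_pos_iff.mpr hne
  obtain ⟨i0, j0, k, _, _, hhead, _⟩ := back_to_head matrix r 0 hcell
  rw [B_iff]
  refine ⟨i0, j0, hhead, 0, by simp, ?_⟩
  simp [pvWin]

-- ===== VERDICT (by name: the statement is the Claim_ definition above) =====
theorem check_sub_in_diag_spec : Claim_equal_check_sub_in_diag := by
  intro matrix s _ hpre
  unfold Spec_check_sub_in_diag
  by_cases hs : s = []
  · subst hs
    rw [A_empty_s matrix, B_empty_s matrix (hpre.1 rfl)]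
  · have hL : 1 ≤ s.length := List.length_pos_iff.mpr hs
    obtain ⟨hC1, hC2⟩ := hpre.2 hs
    rw [Bool.eq_iff_iff, A_iff _ _ hs, B_iff]
    exact exists_equiv matrix s hL hC1 hC2
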